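-- pv_equiv track=rewrite | github.com/heuristic-solver/linkedin-job-matcher | app.py | _apply_job_filters
-- ===== SOURCE A (Python) =====
-- def _apply_job_filters(jobs, salary_min, salary_max, job_type, experience_level):
--     """Apply filters to job list"""
--     filtered = jobs.copy()
--
--     # Filter by job type (if job descriptions contain keywords)
--     if job_type and job_type != 'all':
--         job_type_keywords = {
--             'full-time': ['full-time', 'full time', 'permanent'],
--             'part-time': ['part-time', 'part time'],
--             'contract': ['contract', 'contractor', 'freelance'],
--             'remote': ['remote', 'work from home', 'wfh', 'distributed']
--         }
--
--         keywords = job_type_keywords.get(job_type.lower(), [])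
--         if keywords:
--             filtered = [j for j in filtered if any(kw in j.get('description', '').lower() or kw in j.get('title', '').lower() for kw in keywords)]
--
--     # Filter by experience level
--     if experience_level and experience_level != 'all':
--         exp_keywords = {
--             'entry': ['junior', 'entry', 'graduate', 'intern', 'associate'],
--             'mid': ['mid-level', 'mid level', 'experienced'],
--             'senior': ['senior', 'lead', 'principal', 'architect', 'manager']
--         }
--
--         keywords = exp_keywords.get(experience_level.lower(), [])
--         if keywords:
--             filtered = [j for j in filtered if any(kw in j.get('title', '').lower() or kw in j.get('description', '').lower() for kw in keywords)]
--
--     # Note: Salary filtering would require extracting salary from job descriptions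
--     # This is a simplified version - in production, you'd parse salary ranges
--
--     return filtered
-- ===== SOURCE B (Python) =====
-- _JOB_TYPE_KEYWORDS = {
--     'full-time': ['full-time', 'full time', 'permanent'],
--     'part-time': ['part-time', 'part time'],
--     'contract': ['contract', 'contractor', 'freelance'],
--     'remote': ['remote', 'work from home', 'wfh', 'distributed'],
-- }
--
-- _EXP_KEYWORDS = {
--     'entry': ['junior', 'entry', 'graduate', 'intern', 'associate'],
--     'mid': ['mid-level', 'mid level', 'experienced'],
--     'senior': ['senior', 'lead', 'principal', 'architect', 'manager'],
-- }
--
--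
-- def _matching_indices(keywords, texts):
--     """Keyword-major scan: indices of texts hit by at least one keyword."""
--     hit = set()
--     for kw in keywords:
--         for i, (desc, title) in enumerate(texts):
--             if kw in desc or kw in title:
--                 hit.add(i)
--     return hit
--
--
-- def _apply_job_filters(jobs, salary_min, salary_max, job_type, experience_level):
--     texts = [(j.get('description', '').lower(), j.get('title', '').lower()) for j in jobs]
--     keep = set(range(len(jobs)))
--     for value, table in ((job_type, _JOB_TYPE_KEYWORDS), (experience_level, _EXP_KEYWORDS)):
--         if value and value != 'all':
--             kws = table.get(value.lower(), [])
--             if kws: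
--                 keep &= _matching_indices(kws, texts)
--     return [j for i, j in enumerate(jobs) if i in keep]
-- ===== Notes on version B (the rewrite author's own statement) =====
-- stated objective: alternative
-- what changed: B inverts the traversal: it precomputes the lowered (description,title) texts once, runs a keyword-major scan building a set of matching job indices per active filter, intersects those index sets with set(range(len(jobs))), and finally selects the surviving jobs by index in original order, instead of A's job-major passes that rebuild the list with any() over keywords.
import Mathlib
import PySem

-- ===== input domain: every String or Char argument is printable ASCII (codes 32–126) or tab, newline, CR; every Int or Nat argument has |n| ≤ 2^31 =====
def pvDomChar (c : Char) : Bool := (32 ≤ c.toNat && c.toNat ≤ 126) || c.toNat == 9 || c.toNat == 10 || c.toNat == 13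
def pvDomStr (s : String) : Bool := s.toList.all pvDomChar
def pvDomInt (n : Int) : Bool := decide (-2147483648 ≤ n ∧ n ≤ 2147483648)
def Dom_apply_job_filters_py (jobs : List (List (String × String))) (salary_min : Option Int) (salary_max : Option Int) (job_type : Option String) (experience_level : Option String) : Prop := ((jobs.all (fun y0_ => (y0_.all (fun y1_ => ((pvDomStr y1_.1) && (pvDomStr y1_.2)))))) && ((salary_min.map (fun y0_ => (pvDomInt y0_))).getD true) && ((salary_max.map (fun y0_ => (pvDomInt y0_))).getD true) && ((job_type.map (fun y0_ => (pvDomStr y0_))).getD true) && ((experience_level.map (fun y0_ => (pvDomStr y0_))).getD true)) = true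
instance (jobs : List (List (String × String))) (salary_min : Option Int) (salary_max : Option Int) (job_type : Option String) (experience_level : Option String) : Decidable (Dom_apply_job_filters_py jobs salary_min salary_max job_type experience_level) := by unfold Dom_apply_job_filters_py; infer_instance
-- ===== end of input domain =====

-- B lowers each job's description/title once, runs a keyword-major scan building an index
-- set per active filter, intersects the sets with set(range(n)) and selects survivors by
-- index, instead of A's job-major list-rebuilding passes; objective: alternative.
-- Return-value equivalence only (A returns a fresh copy of the input list, same value).

-- ===== PORT A =====
def pvJobTypeKeywords : PySem.Dict String (List String) :=
  PySem.Dict.ofList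
    [("full-time", ["full-time", "full time", "permanent"]),
     ("part-time", ["part-time", "part time"]),
     ("contract", ["contract", "contractor", "freelance"]),
     ("remote", ["remote", "work from home", "wfh", "distributed"])]

def pvExpKeywords : PySem.Dict String (List String) :=
  PySem.Dict.ofList
    [("entry", ["junior", "entry", "graduate", "intern", "associate"]),
     ("mid", ["mid-level", "mid level", "experienced"]),
     ("senior", ["senior", "lead", "principal", "architect", "manager"])]

def apply_job_filters_py (jobs : List (List (String × String))) (salary_min : Option Int) (salary_max : Option Int) (job_type : Option String) (experience_level : Option String) : List (List (String × String)) :=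
  let filtered := jobs
  -- if job_type and job_type != 'all':
  let filtered :=
    match job_type with
    | none => filtered
    | some jt =>
      if jt != "" && jt != "all" then
        let keywords := PySem.Dict.getD pvJobTypeKeywords (PySem.Str.lower jt) []
        if keywords.isEmpty then filtered
        else
          filtered.filter (fun j =>
            keywords.any (fun kw =>
              PySem.Str.isIn kw (PySem.Str.lower (PySem.Dict.getD ⟨j⟩ "description" "")) ||
              PySem.Str.isIn kw (PySem.Str.lower (PySem.Dict.getD ⟨j⟩ "title" ""))))
      else filtered
  -- if experience_level and experience_level != 'all':
  let filtered :=
    match experience_level with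
    | none => filtered
    | some el =>
      if el != "" && el != "all" then
        let keywords := PySem.Dict.getD pvExpKeywords (PySem.Str.lower el) []
        if keywords.isEmpty then filtered
        else
          filtered.filter (fun j =>
            keywords.any (fun kw =>
              PySem.Str.isIn kw (PySem.Str.lower (PySem.Dict.getD ⟨j⟩ "title" "")) ||
              PySem.Str.isIn kw (PySem.Str.lower (PySem.Dict.getD ⟨j⟩ "description" ""))))
      else filtered
  filtered

-- ===== PORT B =====
-- Keyword-major scan: indices of texts hit by at least one keyword.
def pvMatchingIndices (keywords : List String) (texts : List (String × String)) : PySem.Set Int :=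
  keywords.foldl (fun hit kw =>
    (PySem.List.enumerate texts 0).foldl (fun hit e =>
      if PySem.Str.isIn kw e.2.1 || PySem.Str.isIn kw e.2.2 then PySem.Set.add hit e.1 else hit) hit)
    PySem.Set.empty

def apply_job_filters_py_alt (jobs : List (List (String × String))) (salary_min : Option Int) (salary_max : Option Int) (job_type : Option String) (experience_level : Option String) : List (List (String × String)) :=
  let texts := jobs.map (fun j =>
    (PySem.Str.lower (PySem.Dict.getD ⟨j⟩ "description" ""),
     PySem.Str.lower (PySem.Dict.getD ⟨j⟩ "title" "")))
  let keep0 : PySem.Set Int := PySem.Set.ofList (PySem.List.pyRange 0 (jobs.length : Int) 1)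
  let keep := [(job_type, pvJobTypeKeywords), (experience_level, pvExpKeywords)].foldl
    (fun keep vt =>
      match vt.1 with
      | none => keep
      | some s =>
        if s != "" && s != "all" then
          let kws := PySem.Dict.getD vt.2 (PySem.Str.lower s) []
          if kws.isEmpty then keep else PySem.Set.inter keep (pvMatchingIndices kws texts)
        else keep) keep0
  ((PySem.List.enumerate jobs 0).filter (fun p => PySem.Set.contains keep p.1)).map (·.2)

-- ===== PRECONDITION & SPEC =====
def Spec_apply_job_filters_py (jobs : List (List (String × String))) (salary_min : Option Int) (salary_max : Option Int) (job_type : Option String) (experience_level : Option String) (out : List (List (String × String))) : Prop := out = apply_job_filters_py_alt jobs salary_min salary_max job_type experience_level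
instance (jobs : List (List (String × String))) (salary_min : Option Int) (salary_max : Option Int) (job_type : Option String) (experience_level : Option String) (out : List (List (String × String))) : Decidable (Spec_apply_job_filters_py jobs salary_min salary_max job_type experience_level out) := by unfold Spec_apply_job_filters_py; infer_instance

-- ===== CLAIM (what is proved, stated in full; the proofs are below) =====
def Claim_equal_apply_job_filters_py : Prop := ∀ (jobs : List (List (String × String))) (salary_min : Option Int) (salary_max : Option Int) (job_type : Option String) (experience_level : Option String), Dom_apply_job_filters_py jobs salary_min salary_max job_type experience_level → Spec_apply_job_filters_py jobs salary_min salary_max job_type experience_level (apply_job_filters_py jobs salary_min salary_max job_type experience_level)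

-- ===== LEMMAS AND PROOFS =====

-- The lowered (description, title) pair of one job.
def pvText (j : List (String × String)) : String × String :=
  (PySem.Str.lower (PySem.Dict.getD ⟨j⟩ "description" ""),
   PySem.Str.lower (PySem.Dict.getD ⟨j⟩ "title" ""))

-- Keyword list for an active filter; [] means the filter is inactive.
def pvActiveKeywords (value : Option String) (table : PySem.Dict String (List String)) : List String :=
  match value with
  | none => []
  | some s => if s == "" || s == "all" then [] else PySem.Dict.getD table (PySem.Str.lower s) []

-- Both programs keep job j iff each active keyword list hits it (empty list ⇒ pass).
def pvKeep (jtKws expKws : List String) (j : List (String × String)) : Bool :=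
  (jtKws.isEmpty || (jtKws.any fun kw => PySem.Str.isIn kw (pvText j).1 || PySem.Str.isIn kw (pvText j).2)) &&
  (expKws.isEmpty || (expKws.any fun kw => PySem.Str.isIn kw (pvText j).1 || PySem.Str.isIn kw (pvText j).2))

-- One pass of A (a possibly-inactive keyword filter) as a single List.filter.
theorem pass_eq (xs : List (List (String × String))) (v : Option String)
    (table : PySem.Dict String (List String)) (g : List String → List (String × String) → Bool) :
    (match v with
     | none => xs
     | some s =>
       if s != "" && s != "all" then
         let keywords := PySem.Dict.getD table (PySem.Str.lower s) []
         if keywords.isEmpty then xs else xs.filter (g keywords)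
       else xs)
    = xs.filter (fun j => (pvActiveKeywords v table).isEmpty || g (pvActiveKeywords v table) j) := by
  cases v with
  | none => simp [pvActiveKeywords]
  | some s =>
    simp only [pvActiveKeywords]
    have hguard : (s != "" && s != "all") = !(s == "" || s == "all") := by
      cases h1 : (s == "") <;> cases h2 : (s == "all") <;> simp [bne, h1, h2]
    rw [hguard]
    cases hb : (s == "" || s == "all") with
    | true => simp
    | false =>
      simp only [Bool.not_false, if_true]
      cases hk : (PySem.Dict.getD table (PySem.Str.lower s) []).isEmpty with
      | true =>
        have : PySem.Dict.getD table (PySem.Str.lower s) [] = [] := by simpa using hk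
        simp [this]
      | false => simp [hk]

-- A's two sequential passes compute the combined filter.
theorem a_eq_filter (jobs : List (List (String × String))) (salary_min salary_max : Option Int) (job_type experience_level : Option String) :
    apply_job_filters_py jobs salary_min salary_max job_type experience_level =
      jobs.filter (pvKeep (pvActiveKeywords job_type pvJobTypeKeywords) (pvActiveKeywords experience_level pvExpKeywords)) := by
  unfold apply_job_filters_py
  dsimp only
  rw [pass_eq jobs job_type pvJobTypeKeywords (fun kws j => kws.any fun kw =>
        PySem.Str.isIn kw (PySem.Str.lower (PySem.Dict.getD ⟨j⟩ "description" "")) ||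
        PySem.Str.isIn kw (PySem.Str.lower (PySem.Dict.getD ⟨j⟩ "title" ""))),
      pass_eq _ experience_level pvExpKeywords (fun kws j => kws.any fun kw =>
        PySem.Str.isIn kw (PySem.Str.lower (PySem.Dict.getD ⟨j⟩ "title" "")) ||
        PySem.Str.isIn kw (PySem.Str.lower (PySem.Dict.getD ⟨j⟩ "description" ""))),
      List.filter_filter]
  refine List.filter_congr (fun j _ => ?_)
  simp only [pvKeep, pvText]
  simp [Bool.or_comm, Bool.and_comm]

-- Membership in the keyword-major index set.
theorem mem_matching (kws : List String) (texts : List (String × String)) (i : Int) :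
    i ∈ pvMatchingIndices kws texts ↔
      ∃ (k : Nat) (h : k < texts.length), i = (k : Int) ∧
        (kws.any fun kw => PySem.Str.isIn kw texts[k].1 || PySem.Str.isIn kw texts[k].2) = true := by
  unfold pvMatchingIndices
  suffices h : ∀ (l : List String) (s : PySem.Set Int),
      i ∈ l.foldl (fun hit kw =>
        (PySem.List.enumerate texts 0).foldl (fun hit e =>
          if PySem.Str.isIn kw e.2.1 || PySem.Str.isIn kw e.2.2 then PySem.Set.add hit e.1 else hit) hit) s ↔
      i ∈ s ∨ ∃ kw ∈ l, ∃ e ∈ PySem.List.enumerate texts 0,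
        (PySem.Str.isIn kw e.2.1 || PySem.Str.isIn kw e.2.2) = true ∧ i = e.1 by
    rw [h]
    simp only [PySem.Set.empty]
    constructor
    · rintro (hmem | ⟨kw, hkw, e, he, hp, hi⟩)
      · simp at hmem
      · rcases (PySem.List.mem_enumerate_iff _ _ _).1 he with ⟨k, hk, rfl⟩
        exact ⟨k, hk, by simpa using hi, List.any_eq_true.2 ⟨kw, hkw, by simpa using hp⟩⟩
    · rintro ⟨k, hk, rfl, hany⟩
      rcases List.any_eq_true.1 hany with ⟨kw, hkw, hp⟩
      exact Or.inr ⟨kw, hkw, ((0 : Int) + k, texts[k]),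
        (PySem.List.mem_enumerate_iff _ _ _).2 ⟨k, hk, rfl⟩, by simpa using hp, by simp⟩
  intro l
  induction l with
  | nil => intro s; simp
  | cons kw rest ih =>
    intro s
    rw [List.foldl_cons, ih]
    rw [PySem.List.foldl_if_eq_foldl_filter (p := fun e => PySem.Str.isIn kw e.2.1 || PySem.Str.isIn kw e.2.2)
        (f := fun hit (e : Int × String × String) => PySem.Set.add hit e.1),
      PySem.Set.mem_foldl_add]
    constructor
    · rintro ((hs | ⟨e, he, rfl⟩) | ⟨kw', h1, e, h2, h3, h4⟩)
      · exact Or.inl hs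
      · rcases List.mem_filter.1 he with ⟨he, hp⟩
        exact Or.inr ⟨kw, List.mem_cons_self, e, he, hp, rfl⟩
      · exact Or.inr ⟨kw', List.mem_cons_of_mem _ h1, e, h2, h3, h4⟩
    · rintro (hs | ⟨kw', hkw', e, he, hp, hi⟩)
      · exact Or.inl (Or.inl hs)
      · rcases List.mem_cons.1 hkw' with rfl | hkw'
        · exact Or.inl (Or.inr ⟨e, List.mem_filter.2 ⟨he, hp⟩, hi⟩)
        · exact Or.inr ⟨kw', hkw', e, he, hp, hi⟩

-- Membership after one step of B's filter loop.
theorem step_mem (keep : PySem.Set Int) (v : Option String)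
    (table : PySem.Dict String (List String)) (texts : List (String × String)) (i : Int) :
    i ∈ (match v with
         | none => keep
         | some s =>
           if s != "" && s != "all" then
             let kws := PySem.Dict.getD table (PySem.Str.lower s) []
             if kws.isEmpty then keep else PySem.Set.inter keep (pvMatchingIndices kws texts)
           else keep) ↔
      i ∈ keep ∧ ((pvActiveKeywords v table).isEmpty = true ∨
        i ∈ pvMatchingIndices (pvActiveKeywords v table) texts) := by
  cases v with
  | none => simp [pvActiveKeywords]
  | some s =>
    simp only [pvActiveKeywords]
    have hguard : (s != "" && s != "all") = !(s == "" || s == "all") := by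
      cases h1 : (s == "") <;> cases h2 : (s == "all") <;> simp [bne, h1, h2]
    rw [hguard]
    cases hb : (s == "" || s == "all") with
    | true => simp
    | false =>
      simp only [Bool.not_false, if_true]
      cases hk : (PySem.Dict.getD table (PySem.Str.lower s) []).isEmpty with
      | true =>
        have : PySem.Dict.getD table (PySem.Str.lower s) [] = [] := by simpa using hk
        simp [this]
      | false => simp [hk, PySem.Set.mem_inter]

-- Selecting jobs by index from a membership-characterized set is a filter.
theorem sel_eq_filter (xs : List (List (String × String))) (s : Int) (g : List (String × String) → Bool) :
    ((PySem.List.enumerate xs s).filter (fun p => g p.2)).map (·.2) = xs.filter g := by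
  induction xs generalizing s with
  | nil => simp [PySem.List.enumerate_nil]
  | cons x t ih =>
    rw [PySem.List.enumerate_cons]
    cases hg : g x <;> simp [hg, ih]

-- Index selection against any set whose membership on job indices is characterized by g.
theorem final_sel (jobs : List (List (String × String))) (K : PySem.Set Int)
    (g : List (String × String) → Bool)
    (hKmem : ∀ (k : Nat) (hk : k < jobs.length), ((k : Int) ∈ K ↔ g jobs[k] = true)) :
    ((PySem.List.enumerate jobs 0).filter (fun p => PySem.Set.contains K p.1)).map (·.2) =
      jobs.filter g := by
  have hcongr : ∀ p ∈ PySem.List.enumerate jobs 0, PySem.Set.contains K p.1 = g p.2 := by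
    intro p hp
    rcases (PySem.List.mem_enumerate_iff _ _ _).1 hp with ⟨k, hk, rfl⟩
    simp only [Int.zero_add]
    cases hgv : g jobs[k] with
    | true => exact (PySem.Set.contains_iff _ _).2 ((hKmem k hk).2 hgv)
    | false =>
      cases hc : PySem.Set.contains K (k : Int) with
      | false => rfl
      | true =>
        have := (hKmem k hk).1 ((PySem.Set.contains_iff _ _).1 hc)
        rw [this] at hgv
        exact absurd hgv (by simp)
  rw [List.filter_congr hcongr, sel_eq_filter]

-- B computes the same combined filter.
theorem alt_eq_filter (jobs : List (List (String × String))) (salary_min salary_max : Option Int) (job_type experience_level : Option String) :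
    apply_job_filters_py_alt jobs salary_min salary_max job_type experience_level =
      jobs.filter (pvKeep (pvActiveKeywords job_type pvJobTypeKeywords) (pvActiveKeywords experience_level pvExpKeywords)) := by
  unfold apply_job_filters_py_alt
  dsimp only
  rw [List.foldl_cons, List.foldl_cons, List.foldl_nil]
  have htexts : jobs.map (fun j =>
      (PySem.Str.lower (PySem.Dict.getD ⟨j⟩ "description" ""),
       PySem.Str.lower (PySem.Dict.getD ⟨j⟩ "title" ""))) = jobs.map pvText := rfl
  rw [htexts]
  refine final_sel jobs _ _ ?_
  intro k hk
  rw [step_mem _ experience_level pvExpKeywords (jobs.map pvText) _,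
      step_mem _ job_type pvJobTypeKeywords (jobs.map pvText) _]
  have hmatch : ∀ kws : List String, ((k : Int) ∈ pvMatchingIndices kws (jobs.map pvText) ↔
      (kws.any fun kw => PySem.Str.isIn kw (pvText jobs[k]).1 || PySem.Str.isIn kw (pvText jobs[k]).2) = true) := by
    intro kws
    rw [mem_matching]
    constructor
    · rintro ⟨m, hm, hkm, hany⟩
      have : k = m := by exact_mod_cast hkm
      subst this
      simpa using hany
    · intro hany
      exact ⟨k, by simpa using hk, rfl, by simpa using hany⟩
  have hrange : ((k : Int) ∈ PySem.Set.ofList (PySem.List.pyRange 0 (jobs.length : Int) 1)) := by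
    rw [PySem.Set.mem_ofList, PySem.List.mem_pyRange_one]
    omega
  rw [hmatch, hmatch]
  simp only [pvKeep, Bool.and_eq_true, Bool.or_eq_true]
  constructor
  · rintro ⟨⟨_, h1⟩, h2⟩
    exact ⟨h1, h2⟩
  · rintro ⟨h1, h2⟩
    exact ⟨⟨hrange, h1⟩, h2⟩

-- ===== VERDICT (by name: the statement is the Claim_ definition above) =====
theorem apply_job_filters_py_spec : Claim_equal_apply_job_filters_py := by
  intro jobs salary_min salary_max job_type experience_level _
  unfold Spec_apply_job_filters_py
  rw [alt_eq_filter, a_eq_filter]
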